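-- pv_equiv track=rewrite | github.com/HyeM207/Algorithm | Programmers/Lv_3/[Prg] 숫자 게임.py | solution
-- ===== SOURCE A (Python) =====
-- def solution(A, B):
--     A.sort()
--     B.sort()
--     idx_a = 0
--     for idx_b, val_b in enumerate(B):
--         if A[idx_a] >= val_b:
--             continue
--         idx_a += 1
--
--     return idx_a
-- ===== SOURCE B (Python) =====
-- def solution(A, B):
--     A.sort()
--     B.sort()
--     ra = A[:len(B)][::-1]   # only the len(B) smallest A values can ever be paired; largest first
--     rb = B[::-1]            # descending copy of B
--     wins = 0
--     hi = 0                  # points at the largest still-unmatched B value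
--     lo = len(rb) - 1        # points at the smallest still-alive B value
--     for a in ra:            # take the pairable A values from the top down
--         if hi <= lo and rb[hi] > a:
--             wins += 1       # top B beats top A: pair them off
--             hi += 1
--         else:
--             lo -= 1         # concede: burn the smallest remaining B value
--     return wins
-- ===== Notes on version B (the rewrite author's own statement) =====
-- stated objective: alternative
-- what changed: A walks sorted B upward keeping a single counter-index into sorted A's prefix; B walks the len(B) smallest A values downward over reversed copies with a shrinking two-pointer window into descending B, pairing the current largest B against the current largest pairable A and burning the smallest B on a loss.
-- outside the precondition, e.g. on solution([5], [1, 2]): A returns 0, B returns 0; on solution([1], [2, 3]): A raises IndexError, B returns 1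
import Mathlib
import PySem

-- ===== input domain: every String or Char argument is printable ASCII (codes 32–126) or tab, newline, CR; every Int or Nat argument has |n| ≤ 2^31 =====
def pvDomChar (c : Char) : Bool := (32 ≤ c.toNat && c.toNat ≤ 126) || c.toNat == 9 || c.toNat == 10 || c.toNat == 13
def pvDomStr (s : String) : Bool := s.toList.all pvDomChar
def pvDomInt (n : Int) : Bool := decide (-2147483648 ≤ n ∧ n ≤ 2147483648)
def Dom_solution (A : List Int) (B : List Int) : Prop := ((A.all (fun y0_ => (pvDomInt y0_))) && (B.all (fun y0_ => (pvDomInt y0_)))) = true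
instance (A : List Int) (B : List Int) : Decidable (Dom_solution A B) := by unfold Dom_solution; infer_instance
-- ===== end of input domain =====

-- B replaces A's ascending walk over B (counter-index into sorted A's prefix) with a descending
-- two-pointer window over reversed copies; alternative decomposition, same cost. Both Pythons sort
-- their arguments in place; the equivalence proved here is about the return value only.


-- ===== PORT A =====
def solution (A : List Int) (B : List Int) : Int :=
  let sA := PySem.List.sorted A (fun x => x) false
  let sB := PySem.List.sorted B (fun x => x) false
  -- for idx_b, val_b in enumerate(B): if A[idx_a] >= val_b: continue; else idx_a += 1
  -- (A[idx_a] via pyGetD: in range on every input Pre_ admits)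
  sB.foldl (fun idxa vb => if PySem.List.pyGetD sA idxa 0 ≥ vb then idxa else idxa + 1) 0

-- ===== PORT B =====
def solution_alt (A : List Int) (B : List Int) : Int :=
  let sA := PySem.List.sorted A (fun x => x) false
  let sB := PySem.List.sorted B (fun x => x) false
  let ra := (PySem.List.slice? (PySem.List.slice sA none (some (sB.length : Int))) none none (-1)).getD []   -- A[:len(B)][::-1]
  let rb := (PySem.List.slice? sB none none (-1)).getD []   -- B[::-1]
  -- for a in ra: if hi <= lo and rb[hi] > a: wins += 1; hi += 1 else: lo -= 1
  let st := ra.foldl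
    (fun (st : Int × Int × Int) a =>
      let hi := st.1; let lo := st.2.1; let wins := st.2.2
      if hi ≤ lo ∧ PySem.List.pyGetD rb hi 0 > a then (hi + 1, lo, wins + 1)
      else (hi, lo - 1, wins))
    (0, (rb.length : Int) - 1, 0)
  st.2.2

-- ===== PRECONDITION & SPEC =====
-- Pre_ excludes inputs with len(B) > len(A) (outside the problem's equal-length domain), on which
-- A raises IndexError mid-loop whenever its counter reaches len(A) with B values left over; whether
-- that happens depends on the values, so no closed-form condition is tighter.
def Pre_solution (A : List Int) (B : List Int) : Prop := B.length ≤ A.length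
instance (A : List Int) (B : List Int) : Decidable (Pre_solution A B) := by unfold Pre_solution; infer_instance
def pvWitness_solution : List Int × List Int := ([3, 1, 5], [2, 6, 4])
def Spec_solution (A : List Int) (B : List Int) (out : Int) : Prop := out = solution_alt A B
instance (A : List Int) (B : List Int) (out : Int) : Decidable (Spec_solution A B out) := by unfold Spec_solution; infer_instance

-- ===== CLAIM (what is proved, stated in full; the proofs are below) =====
def Claim_equal_solution : Prop := ∀ (A : List Int) (B : List Int), Dom_solution A B → Pre_solution A B → Spec_solution A B (solution A B)

-- ===== LEMMAS AND PROOFS =====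

-- A's greedy as structural recursion on ascending lists: consume b's upward, consume an a on each win.
def grB : List Int → List Int → Nat
  | _, [] => 0
  | [], _ :: _ => 0
  | a :: as, b :: bs => if b ≤ a then grB (a :: as) bs else 1 + grB as bs
  termination_by _ bs => bs.length

-- B's greedy as structural recursion on descending lists: window of still-alive b's, drop the
-- smallest alive b on a loss.
def trB : List Int → List Int → Nat
  | [], _ => 0
  | _ :: _, [] => 0
  | a :: ras, b :: rbs => if b > a then 1 + trB ras rbs else trB ras ((b :: rbs).dropLast)

@[simp] lemma grB_nil (bs : List Int) : grB [] bs = 0 := by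
  cases bs <;> simp [grB]

@[simp] lemma grB_nil_right (as : List Int) : grB as [] = 0 := by
  cases as <;> simp [grB]

lemma grB_le (as bs : List Int) : grB as bs ≤ bs.length := by
  induction bs generalizing as with
  | nil => simp
  | cons b bs ih =>
    cases as with
    | nil => simp
    | cons a as =>
      by_cases hc : b ≤ a
      · have := ih (a :: as)
        simp only [grB, if_pos hc]
        simp only [List.length_cons]; omega
      · have := ih as
        simp only [grB, if_neg hc]
        simp only [List.length_cons]; omega

-- S1: appending a b that beats everything in as adds exactly one win (as not yet exhausted).
lemma grB_append_win (bs : List Int) : ∀ (as : List Int) (b : Int),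
    grB as bs < as.length → (∀ x ∈ as, x < b) → grB as (bs ++ [b]) = grB as bs + 1 := by
  induction bs with
  | nil =>
    intro as b h hb
    cases as with
    | nil => simp at h
    | cons a as =>
      have : ¬ b ≤ a := by have := hb a (by simp); omega
      simp [grB, this]
  | cons b1 bs ih =>
    intro as b h hb
    cases as with
    | nil => simp at h
    | cons a as =>
      by_cases hc : b1 ≤ a
      · simp only [List.cons_append, grB, if_pos hc] at h ⊢
        exact ih (a :: as) b h hb
      · simp only [List.cons_append, grB, if_neg hc, List.length_cons] at h ⊢
        have h' : grB as bs < as.length := by omega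
        rw [ih as b h' (fun x hx => hb x (by simp [hx]))]; omega

-- S2: a last a is never read when there are at most |as| many b's.
lemma grB_append_unread (bs : List Int) : ∀ (as : List Int) (a : Int),
    bs.length ≤ as.length → grB (as ++ [a]) bs = grB as bs := by
  induction bs with
  | nil => simp
  | cons b bs ih =>
    intro as a h
    cases as with
    | nil => simp at h
    | cons a1 as =>
      simp only [List.cons_append, grB]
      split
      · exact ih (a1 :: as) a (by simp at h ⊢; omega)
      · rw [ih as a (by simp at h ⊢; omega)]

-- S3: a last a at least as large as every b never changes the count (it only ever loses).
lemma grB_append_lose (bs : List Int) : ∀ (as : List Int) (a : Int),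
    (∀ x ∈ bs, x ≤ a) → grB (as ++ [a]) bs = grB as bs := by
  induction bs with
  | nil => simp
  | cons b bs ih =>
    intro as a hb
    cases as with
    | nil =>
      simp only [List.nil_append, grB, hb b (by simp), if_pos]
      have := ih [] a (fun x hx => hb x (by simp [hx]))
      simpa using this
    | cons a1 as =>
      simp only [List.cons_append, grB]
      split
      · exact ih (a1 :: as) a (fun x hx => hb x (by simp [hx]))
      · rw [ih as a (fun x hx => hb x (by simp [hx]))]

-- S4: with strictly more b's than a's, the smallest b is never used.
lemma grB_tail (as : List Int) : ∀ (bs : List Int),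
    as.length < bs.length → bs.Pairwise (· ≤ ·) → grB as bs = grB as bs.tail := by
  induction as with
  | nil => simp
  | cons a as ih =>
    intro bs hlen hp
    cases bs with
    | nil => simp at hlen
    | cons b bs =>
      simp only [List.tail_cons, grB]
      split
      · rfl
      · cases bs with
        | nil => simp at hlen
        | cons c bs2 =>
          have hbc : b ≤ c := (List.pairwise_cons.mp hp).1 c (by simp)
          have hac : ¬ c ≤ a := by omega
          simp only [grB, if_neg hac]
          have := ih (c :: bs2) (by simp at hlen ⊢; omega) (List.pairwise_cons.mp hp).2
          simpa [grB, hac] using this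

-- core: on equally long descending lists, A's bottom-up greedy equals B's top-down window greedy.
lemma grB_eq_trB (ras : List Int) : ∀ (rbs : List Int),
    ras.length = rbs.length →
    ras.Pairwise (fun x y => y ≤ x) → rbs.Pairwise (fun x y => y ≤ x) →
    grB ras.reverse rbs.reverse = trB ras rbs := by
  induction ras with
  | nil =>
    intro rbs h _ _
    have : rbs = [] := List.eq_nil_of_length_eq_zero (by simp at h; omega)
    simp [this, trB]
  | cons a ras ih =>
    intro rbs hlen hpa hpb
    cases rbs with
    | nil => simp at hlen
    | cons b rbs =>
      have hlen' : ras.length = rbs.length := by simpa using hlen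
      have hpa' := List.pairwise_cons.mp hpa
      have hpb' := List.pairwise_cons.mp hpb
      simp only [List.reverse_cons]
      by_cases hab : b > a
      · -- win: b beats everything in ras.reverse ++ [a]
        have hwin : grB (ras.reverse ++ [a]) (rbs.reverse ++ [b])
            = grB (ras.reverse ++ [a]) rbs.reverse + 1 := by
          apply grB_append_win
          · calc grB (ras.reverse ++ [a]) rbs.reverse ≤ rbs.reverse.length := grB_le _ _
              _ < (ras.reverse ++ [a]).length := by simp; omega
          · intro x hx
            rcases List.mem_append.mp hx with hx | hx
            · have := hpa'.1 x (List.mem_reverse.mp hx); omega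
            · simp at hx; omega
        rw [hwin, grB_append_unread _ _ _ (by simp; omega),
            ih rbs hlen' hpa'.2 hpb'.2]
        simp [trB, hab]; omega
      · -- loss: a beats b (hence everything in rbs.reverse ++ [b])
        have hlose : grB (ras.reverse ++ [a]) (rbs.reverse ++ [b])
            = grB ras.reverse (rbs.reverse ++ [b]) := by
          apply grB_append_lose
          intro x hx
          rcases List.mem_append.mp hx with hx | hx
          · have := hpb'.1 x (List.mem_reverse.mp hx); omega
          · simp at hx; omega
        have hasc : (rbs.reverse ++ [b]).Pairwise (· ≤ ·) := by
          have : ((b :: rbs).reverse).Pairwise (· ≤ ·) := by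
            rw [List.pairwise_reverse]; exact hpb
          simpa using this
        have htail : grB ras.reverse (rbs.reverse ++ [b])
            = grB ras.reverse ((rbs.reverse ++ [b]).tail) :=
          grB_tail _ _ (by simp; omega) hasc
        cases rbs with
        | nil =>
          -- n = 1: single losing comparison on both sides
          have : ras = [] := List.eq_nil_of_length_eq_zero (by simpa using hlen')
          subst this
          simp [grB, trB, hab, not_lt.mp hab]
        | cons r rbs2 =>
          have hrev : ((r :: rbs2).reverse ++ [b]).tail
              = (r :: rbs2).dropLast.reverse ++ [b] := by
            rw [List.tail_append_singleton_of_ne_nil (by simp), List.tail_reverse]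
          have hih := ih (b :: (r :: rbs2).dropLast)
            (by simp at hlen' ⊢; omega)
            hpa'.2
            (by
              refine List.pairwise_cons.mpr ⟨?_, hpb'.2.sublist (List.dropLast_sublist _)⟩
              intro x hx
              exact hpb'.1 x (List.mem_of_mem_dropLast hx))
          rw [hlose, htail, hrev]
          simp only [List.reverse_cons] at hih
          rw [hih]
          simp [trB, hab]

@[simp] lemma trB_nil_right (ras : List Int) : trB ras [] = 0 := by
  cases ras <;> simp [trB]

-- A's greedy reads at most |bs| elements of as.
lemma grB_take (bs : List Int) : ∀ (as : List Int) (n : Nat),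
    bs.length ≤ n → grB (as.take n) bs = grB as bs := by
  induction bs with
  | nil => simp
  | cons b bs ih =>
    intro as n h
    cases as with
    | nil => simp
    | cons a as =>
      cases n with
      | zero => simp at h
      | succ n =>
        simp only [List.take_succ_cons, grB]
        split
        · have := ih (a :: as) (n + 1) (by simp at h ⊢; omega)
          simpa using this
        · rw [ih as n (by simp at h ⊢; omega)]

lemma dropLast_take_of_le (l : List Int) (n : Nat) (h : n ≤ l.length) :
    (l.take n).dropLast = l.take (n - 1) := by
  rcases lt_or_eq_of_le h with h | h
  · exact List.dropLast_take h
  · subst h; rw [List.take_length, List.dropLast_eq_take]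

-- bridge for port A: the foldl with an Int counter indexing sorted A equals grB.
lemma bridgeA (as : List Int) : ∀ (bs : List Int) (i : Nat),
    bs.length + i ≤ as.length →
    bs.foldl (fun idxa vb => if PySem.List.pyGetD as idxa 0 ≥ vb then idxa else idxa + 1) (i : Int)
      = ((i + grB (as.drop i) bs : Nat) : Int) := by
  intro bs
  induction bs with
  | nil => intro i _; simp
  | cons b bs ih =>
    intro i h
    have hi : i < as.length := by simp at h; omega
    have hdrop : as.drop i = as[i] :: as.drop (i + 1) := List.drop_eq_getElem_cons hi
    have hget : PySem.List.pyGetD as (i : Int) 0 = as[i] := by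
      rw [PySem.List.pyGetD_natCast as i 0, List.getD_eq_getElem as 0 hi]
    simp only [List.foldl_cons, hget]
    by_cases hc : as[i] ≥ b
    · rw [if_pos hc, ih i (by simp at h ⊢; omega), hdrop]
      simp only [grB, if_pos hc]
    · rw [if_neg hc]
      have : ((i : Int) + 1) = ((i + 1 : Nat) : Int) := by push_cast; ring
      rw [this, ih (i + 1) (by simp at h ⊢; omega), hdrop]
      simp only [grB, if_neg hc]
      push_cast; ring

-- bridge for port B: the two-pointer foldl equals trB on the current window of rb.
lemma bridgeB (rb : List Int) : ∀ (ras : List Int) (hi : Nat) (lo wins : Int),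
    lo < rb.length →
    (ras.foldl
      (fun (st : Int × Int × Int) a =>
        let hi := st.1; let lo := st.2.1; let wins := st.2.2
        if hi ≤ lo ∧ PySem.List.pyGetD rb hi 0 > a then (hi + 1, lo, wins + 1)
        else (hi, lo - 1, wins))
      ((hi : Int), lo, wins)).2.2
      = wins + ((trB ras ((rb.drop hi).take (lo + 1 - hi).toNat) : Nat) : Int) := by
  intro ras
  induction ras with
  | nil => intro hi lo wins _; simp
  | cons a ras ih =>
    intro hi lo wins hlo
    simp only [List.foldl_cons]
    by_cases hwin : (hi : Int) ≤ lo ∧ PySem.List.pyGetD rb (hi : Int) 0 > a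
    · have hhi : hi < rb.length := by omega
      have hget : PySem.List.pyGetD rb (hi : Int) 0 = rb[hi] := by
        rw [PySem.List.pyGetD_natCast rb hi 0, List.getD_eq_getElem rb 0 hhi]
      have hdrop : rb.drop hi = rb[hi] :: rb.drop (hi + 1) := List.drop_eq_getElem_cons hhi
      have hk : (lo + 1 - (hi : Int)).toNat = (lo - hi).toNat + 1 := by omega
      rw [if_pos hwin]
      have : ((hi : Int) + 1, lo, wins + 1) = (((hi + 1 : Nat) : Int), lo, wins + 1) := by
        push_cast; rfl
      rw [this, ih (hi + 1) lo (wins + 1) hlo, hdrop, hk, List.take_succ_cons]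
      have hb : rb[hi] > a := hget ▸ hwin.2
      simp only [trB, if_pos hb]
      have : (lo + 1 - ((hi : Nat) + 1 : Nat)) = lo - (hi : Int) := by push_cast; ring
      rw [this]
      push_cast; ring
    · rw [if_neg hwin]
      rw [ih hi (lo - 1) wins (by omega)]
      have hw : trB (a :: ras) ((rb.drop hi).take (lo + 1 - (hi : Int)).toNat)
          = trB ras ((rb.drop hi).take (lo - 1 + 1 - (hi : Int)).toNat) := by
        by_cases hle : (hi : Int) ≤ lo
        · -- window nonempty, a loses: drop the smallest alive b
          have hhi : hi < rb.length := by omega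
          have hget : PySem.List.pyGetD rb (hi : Int) 0 = rb[hi] := by
            rw [PySem.List.pyGetD_natCast rb hi 0, List.getD_eq_getElem rb 0 hhi]
          have hb : ¬ rb[hi] > a := fun hgt => hwin ⟨hle, hget ▸ hgt⟩
          have hdrop : rb.drop hi = rb[hi] :: rb.drop (hi + 1) := List.drop_eq_getElem_cons hhi
          have hk : (lo + 1 - (hi : Int)).toNat = (lo - hi).toNat + 1 := by omega
          rw [hdrop, hk, List.take_succ_cons]
          simp only [trB, if_neg hb]
          rw [← List.take_succ_cons, ← hk, ← hdrop]
          rw [dropLast_take_of_le (rb.drop hi) _ (by simp; omega)]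
          have : ((lo + 1 - (hi : Int)).toNat - 1) = (lo - 1 + 1 - (hi : Int)).toNat := by omega
          rw [this]
        · -- window already empty: both sides are the empty window
          have h1 : (lo + 1 - (hi : Int)).toNat = 0 := by omega
          have h2 : (lo - 1 + 1 - (hi : Int)).toNat = 0 := by omega
          rw [h1, h2]
          simp
      rw [hw]

-- ===== VERDICT (by name: the statement is the Claim_ definition above) =====
theorem solution_spec : Claim_equal_solution := by
  unfold Claim_equal_solution
  intro A B _ hpre
  unfold Spec_solution solution solution_alt
  simp only [PySem.List.slice?_none_none_neg_one, Option.getD_some]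
  set sA := PySem.List.sorted A (fun x => x) false with hsA
  set sB := PySem.List.sorted B (fun x => x) false with hsB
  have hlen : sB.length ≤ sA.length := by
    rw [hsA, hsB, PySem.List.length_sorted, PySem.List.length_sorted]; exact hpre
  -- A's side
  have hA := bridgeA sA sB 0 (by omega)
  simp only [Nat.cast_zero, List.drop_zero, Nat.zero_add] at hA
  rw [hA]
  -- B's side: A[:len(B)] is sA.take sB.length
  rw [PySem.List.slice_to_natCast]
  have hB := bridgeB sB.reverse (sA.take sB.length).reverse 0
    ((sB.reverse.length : Int) - 1) 0 (by omega)
  simp only [Nat.cast_zero, List.drop_zero, zero_add, sub_zero, sub_add_cancel,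
    Int.toNat_natCast, List.take_length] at hB
  rw [hB]
  -- the two greedies agree
  have hpa : (sA.take sB.length).reverse.Pairwise (fun x y => y ≤ x) := by
    rw [List.pairwise_reverse]
    exact (PySem.List.sorted_pairwise A (fun x => x)).sublist (List.take_sublist _ _)
  have hpb : sB.reverse.Pairwise (fun x y => y ≤ x) := by
    rw [List.pairwise_reverse]
    exact PySem.List.sorted_pairwise B (fun x => x)
  have hmain := grB_eq_trB (sA.take sB.length).reverse sB.reverse
    (by simp; omega) hpa hpb
  simp only [List.reverse_reverse] at hmain
  rw [grB_take sB sA sB.length (le_refl _)] at hmain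
  rw [hmain]
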